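-- pv_equiv track=rewrite | github.com/shaform/disambig | linkage/argument.py | get_argument_offsets
-- ===== SOURCE A (Python) =====
-- def get_argument_offsets(arg_indices):
--     offsets = []
--     for indices in arg_indices:
--         for i, idx in enumerate(indices):
--             assert(i == 0 or indices[i - 1] + 1 == idx)
--         offsets.append((indices[0], indices[-1] + 1))
--
--     for prev, curr in zip(offsets, offsets[1:]):
--         assert(prev[1] == curr[0])
--     return offsets
-- ===== SOURCE B (Python) =====
-- def get_argument_offsets(arg_indices):
--     flat = [idx for indices in arg_indices for idx in indices]
--     if flat:
--         assert flat == list(range(flat[0], flat[-1] + 1))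
--     offsets = []
--     pos = flat[0] if flat else 0
--     for indices in arg_indices:
--         offsets.append((pos, pos + len(indices)))
--         pos += len(indices)
--     return offsets
-- ===== Notes on version B (the rewrite author's own statement) =====
-- stated objective: alternative
-- what changed: B flattens all groups, validates the whole concatenation against a single global range(flat[0], flat[-1]+1), and reconstructs the offsets by a prefix-sum over group lengths from the global start, instead of A's per-group endpoint extraction with adjacent-element asserts plus a second zip pass.
import Mathlib
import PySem

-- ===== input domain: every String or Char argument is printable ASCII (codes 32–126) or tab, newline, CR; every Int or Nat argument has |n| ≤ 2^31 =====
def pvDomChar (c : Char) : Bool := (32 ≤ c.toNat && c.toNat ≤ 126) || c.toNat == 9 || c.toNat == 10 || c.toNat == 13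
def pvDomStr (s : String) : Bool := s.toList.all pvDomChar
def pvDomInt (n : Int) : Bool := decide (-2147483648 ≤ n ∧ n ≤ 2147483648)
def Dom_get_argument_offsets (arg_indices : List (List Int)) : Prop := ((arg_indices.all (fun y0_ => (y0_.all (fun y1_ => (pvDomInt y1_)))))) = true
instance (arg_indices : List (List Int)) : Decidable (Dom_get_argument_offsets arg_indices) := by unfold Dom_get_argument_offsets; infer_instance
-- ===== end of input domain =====

-- B flattens all groups, checks one global range, and rebuilds offsets by a prefix sum
-- over group lengths — a different decomposition from A's per-group endpoint scan +
-- second zip pass; proved equal wherever A returns (Pre_ excludes inputs where A raises).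


-- ===== PORT A =====
-- A: one loop appending (indices[0], indices[-1]+1) per group (the asserts only raise,
-- excluded by Pre_); the second zip loop only asserts and contributes no value.
def get_argument_offsets (arg_indices : List (List Int)) : List (Int × Int) :=
  arg_indices.foldl
    (fun offsets indices =>
      offsets ++ [((PySem.List.pyGet? indices 0).getD 0,
                   (PySem.List.pyGet? indices (-1)).getD 0 + 1)])
    []

-- ===== PORT B =====
-- B: flatten, take global start (its global-range assert only raises, excluded by Pre_),
-- then a loop accumulating a running position by each group's length.
def get_argument_offsets_alt (arg_indices : List (List Int)) : List (Int × Int) :=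
  let flat := arg_indices.flatMap id
  let pos0 : Int := flat.headD 0
  (arg_indices.foldl
    (fun (st : Int × List (Int × Int)) indices =>
      (st.1 + indices.length, st.2 ++ [(st.1, st.1 + (indices.length : Int))]))
    (pos0, [])).2

-- ===== PRECONDITION & SPEC =====
-- Pre_ excludes exactly the inputs on which A raises: an empty group (IndexError),
-- a non-contiguous group, or non-adjacent consecutive groups (AssertionError).
def Pre_get_argument_offsets (arg_indices : List (List Int)) : Prop :=
  (∀ g ∈ arg_indices, g ≠ [] ∧ List.IsChain (fun a b => b = a + 1) g) ∧
  List.IsChain (fun g h => g.getLastD 0 + 1 = h.headD 0) arg_indices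

instance (arg_indices : List (List Int)) : Decidable (Pre_get_argument_offsets arg_indices) := by
  unfold Pre_get_argument_offsets; infer_instance

def pvWitness_get_argument_offsets : List (List Int) := [[0, 1], [2, 3, 4], [5]]

def Spec_get_argument_offsets (arg_indices : List (List Int)) (out : List (Int × Int)) : Prop := out = get_argument_offsets_alt arg_indices
instance (arg_indices : List (List Int)) (out : List (Int × Int)) : Decidable (Spec_get_argument_offsets arg_indices out) := by unfold Spec_get_argument_offsets; infer_instance

-- ===== CLAIM (what is proved, stated in full; the proofs are below) =====
def Claim_equal_get_argument_offsets : Prop := ∀ (arg_indices : List (List Int)), Dom_get_argument_offsets arg_indices → Pre_get_argument_offsets arg_indices → Spec_get_argument_offsets arg_indices (get_argument_offsets arg_indices)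

-- ===== LEMMAS AND PROOFS =====
def pvPair (indices : List Int) : Int × Int :=
  ((PySem.List.pyGet? indices 0).getD 0, (PySem.List.pyGet? indices (-1)).getD 0 + 1)

lemma foldlA_eq (xs : List (List Int)) :
    ∀ acc : List (Int × Int),
      xs.foldl (fun offsets indices => offsets ++ [pvPair indices]) acc = acc ++ xs.map pvPair := by
  induction xs with
  | nil => intro acc; simp
  | cons g gs ih => intro acc; rw [List.foldl_cons, ih]; simp [pvPair]

-- recursive form of B's loop, for the induction
def pvSpans : Int → List (List Int) → List (Int × Int)
  | _, [] => []
  | pos, g :: rest => (pos, pos + (g.length : Int)) :: pvSpans (pos + g.length) rest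

lemma foldlB_eq (xs : List (List Int)) :
    ∀ (pos : Int) (acc : List (Int × Int)),
      (xs.foldl
        (fun (st : Int × List (Int × Int)) indices =>
          (st.1 + indices.length, st.2 ++ [(st.1, st.1 + (indices.length : Int))]))
        (pos, acc)).2 = acc ++ pvSpans pos xs := by
  induction xs with
  | nil => intro pos acc; simp [pvSpans]
  | cons g gs ih => intro pos acc; rw [List.foldl_cons, ih]; simp [pvSpans]

lemma chain_last (g : List Int) (hne : g ≠ [])
    (hc : List.IsChain (fun a b => b = a + 1) g) :
    g.getLastD 0 = g.headD 0 + g.length - 1 := by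
  induction g with
  | nil => simp at hne
  | cons a t ih =>
    cases t with
    | nil => simp
    | cons b t' =>
      rcases List.isChain_cons_cons.mp hc with ⟨hab, hbt⟩
      have := ih (by simp) hbt
      simp only [List.getLastD_cons] at this ⊢
      simp only [List.headD_cons] at this ⊢
      rw [this, hab]
      simp [List.length_cons]
      ring

lemma pvPair_eq (g : List Int) (hne : g ≠ [])
    (hc : List.IsChain (fun a b => b = a + 1) g) :
    pvPair g = (g.headD 0, g.headD 0 + (g.length : Int)) := by
  obtain ⟨a, t, rfl⟩ := List.exists_cons_of_ne_nil hne
  have h1 : PySem.List.pyGet? (a :: t) 0 = some a := by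
    simp
  have h2 : (PySem.List.pyGet? (a :: t) (-1)).getD 0 = (a :: t).getLastD 0 := by
    rw [PySem.List.pyGet?_neg_one]
    exact List.getLastD_eq_getLast?.symm
  have h3 := chain_last (a :: t) hne hc
  simp only [pvPair, h1, Option.getD_some]
  rw [h2, h3]
  simp only [List.headD_cons, Prod.mk.injEq]
  exact ⟨trivial, by ring⟩

lemma spans_eq (xs : List (List Int))
    (hg : ∀ g ∈ xs, g ≠ [] ∧ List.IsChain (fun a b => b = a + 1) g)
    (hadj : List.IsChain (fun g h => g.getLastD 0 + 1 = h.headD 0) xs) :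
    ∀ pos : Int, pos = (xs.headD []).headD pos →
      pvSpans pos xs = xs.map pvPair := by
  induction xs with
  | nil => intro pos _; rfl
  | cons g rest ih =>
    intro pos hpos
    simp only [List.headD_cons] at hpos
    obtain ⟨hne, hc⟩ := hg g (by simp)
    have hgpos : pos = g.headD 0 := by
      obtain ⟨a, t, rfl⟩ := List.exists_cons_of_ne_nil hne
      simpa using hpos
    have hpair := pvPair_eq g hne hc
    have hrest : pvSpans (pos + g.length) rest = rest.map pvPair := by
      cases rest with
      | nil => rfl
      | cons h t =>
        have hhne := (hg h (by simp)).1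
        rcases List.isChain_cons_cons.mp hadj with ⟨hgh, hadj'⟩
        have hlast := chain_last g hne hc
        have hhead : h.headD 0 = pos + (g.length : Int) := by
          rw [← hgh, hlast, hgpos]; ring
        apply ih (fun g' hg' => hg g' (List.mem_cons_of_mem _ hg')) hadj'
        obtain ⟨b, u, rfl⟩ := List.exists_cons_of_ne_nil hhne
        simpa using hhead.symm
    rw [pvSpans, List.map_cons, hpair, ← hgpos, hrest]

-- ===== VERDICT (by name: the statement is the Claim_ definition above) =====
theorem get_argument_offsets_spec : Claim_equal_get_argument_offsets := by
  intro xs _ hpre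
  obtain ⟨hg, hadj⟩ := hpre
  show get_argument_offsets xs = get_argument_offsets_alt xs
  have hA : get_argument_offsets xs = xs.map pvPair :=
    (foldlA_eq xs []).trans (List.nil_append _)
  rw [hA]
  unfold get_argument_offsets_alt
  rw [foldlB_eq, List.nil_append]
  cases xs with
  | nil => rfl
  | cons g rest =>
    refine (spans_eq (g :: rest) hg hadj _ ?_).symm
    obtain ⟨a, t, rfl⟩ := List.exists_cons_of_ne_nil (hg (g) (by simp)).1
    simp
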